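-- pv_equiv track=rewrite | github.com/mikeparcewski/wicked-garden | scripts/_sqlite_store.py | _sanitize_fts_query
-- ===== SOURCE A (Python) =====
-- def _sanitize_fts_query(query: str) -> str:
--     """Sanitize a query string for FTS5 MATCH expressions.
--
--     FTS5's default tokenizer splits on hyphens, so a query like
--     ``wicked-garden`` is interpreted as ``wicked NOT garden``.
--     This function wraps any hyphenated token in double-quotes so
--     FTS5 treats it as a phrase query (adjacent tokens) instead.
--
--     Already-quoted terms are left untouched.
--
--     Note: This is NOT a general-purpose input sanitization layer.
--     Callers are internal plugin agents (memory recall, search commands),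
--     not raw end-user input. FTS5 operators (OR, NOT, NEAR, column
--     filters) are intentionally preserved for advanced queries.
--     Malformed FTS5 expressions raise OperationalError, caught by
--     ``SqliteStore.search()`` which returns ``[]`` gracefully.
--
--     Examples:
--         "wicked-garden"          -> '"wicked-garden"'
--         "code-review deployment" -> '"code-review" deployment'
--         '"already quoted"'       -> '"already quoted"'
--         "plain search"           -> 'plain search'
--     """
--     if not query:
--         return query
--
--     tokens: list[str] = []
--     i = 0
--     chars = query
--
--     while i < len(chars):
--         # Pass through already-quoted phrases untouched
--         if chars[i] == '"':
--             end = chars.find('"', i + 1)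
--             if end == -1:
--                 # Unmatched quote — take rest of string as-is
--                 tokens.append(chars[i:])
--                 break
--             tokens.append(chars[i:end + 1])
--             i = end + 1
--         elif chars[i] in (' ', '\t', '\n'):
--             tokens.append(chars[i])
--             i += 1
--         else:
--             # Collect a non-whitespace, non-quoted token
--             j = i
--             while j < len(chars) and chars[j] not in (' ', '\t', '\n', '"'):
--                 j += 1
--             token = chars[i:j]
--             # Wrap tokens with internal hyphens in double-quotes.
--             # Preserve leading-hyphen tokens (FTS5 NOT operator, e.g. "-bar")
--             # and FTS5 column filters (e.g. "title:foo-bar").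
--             if '-' in token and not token.startswith('"') and not token.startswith('-') and ':' not in token:
--                 token = f'"{token}"'
--             tokens.append(token)
--             i = j
--
--     return ''.join(tokens)
-- ===== SOURCE B (Python) =====
-- def _quote_token(tok: str) -> str:
--     """Wrap a hyphenated token in double-quotes (FTS5 phrase), preserving
--     NOT-operator tokens (leading '-') and column filters (containing ':')."""
--     if '-' in tok and not tok.startswith('-') and ':' not in tok:
--         return f'"{tok}"'
--     return tok
--
--
-- def _outside(text: str) -> str:
--     """Quote hyphenated tokens in quote-free text, preserving all whitespace,
--     by nested split/join on each of the three whitespace separators."""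
--     return '\n'.join(
--         '\t'.join(
--             ' '.join(_quote_token(t) for t in tabbed.split(' '))
--             for tabbed in line.split('\t')
--         )
--         for line in text.split('\n')
--     )
--
--
-- def _sanitize_fts_query(query: str) -> str:
--     # Split on '"': even pieces are outside quotes, odd pieces inside.
--     parts = query.split('"')
--     out = [_outside(parts[0])]
--     k = 1
--     while k < len(parts):
--         if k == len(parts) - 1:
--             # Unmatched quote -- take rest of string as-is
--             out.append('"' + parts[k])
--         else:
--             out.append('"' + parts[k] + '"' + _outside(parts[k + 1]))
--         k += 2
--     return ''.join(out)
-- ===== Notes on version B (the rewrite author's own statement) =====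
-- stated objective: faster
-- what changed: Replaces A's manual per-character index-scanning while-loop (explicit i/j bookkeeping and str.find) by a declarative decomposition: split the query on the double-quote character so even pieces are outside quotes and odd pieces inside, then quote hyphenated tokens in the outside pieces with nested split/join on each whitespace separator.
import Mathlib
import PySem

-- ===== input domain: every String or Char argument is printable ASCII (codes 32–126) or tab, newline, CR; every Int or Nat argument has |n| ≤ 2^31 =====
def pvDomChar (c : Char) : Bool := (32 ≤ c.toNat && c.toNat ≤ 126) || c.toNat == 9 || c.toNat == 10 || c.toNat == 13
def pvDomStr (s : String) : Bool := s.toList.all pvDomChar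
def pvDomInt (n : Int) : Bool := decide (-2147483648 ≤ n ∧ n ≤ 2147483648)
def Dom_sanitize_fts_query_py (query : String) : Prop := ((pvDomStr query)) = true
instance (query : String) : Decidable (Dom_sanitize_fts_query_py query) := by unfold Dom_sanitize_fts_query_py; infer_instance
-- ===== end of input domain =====

-- B replaces A's per-character index-scanning while-loop by a split-on-quote decomposition with
-- nested whitespace split/joins (constant-factor faster: C-level str.split/str.join instead of a
-- Python-level character loop, measured; A does not mutate its argument).

-- ===== PORT A =====
-- token characters: not whitespace, not a quote (the inner while-loop's condition)
def pvTokChar (c : Char) : Bool := !(c == ' ' || c == '\t' || c == '\n' || c == '"')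

-- the outer while-loop of A, on the remaining suffix of the string; builds the tokens list
def pvGoA : List Char → List (List Char)
  | [] => []
  | c :: rest =>
    if c = '"' then
      -- end = chars.find('"', i + 1)  (suffix form: search in rest)
      let e := PySem.Chars.find rest ['"']
      if e = -1 then
        -- unmatched quote: take rest of string as-is, break
        [c :: rest]
      else
        -- tokens.append(chars[i:end+1]); i = end + 1   (chars[i:end+1] = c :: rest.take (e+1), exact)
        (c :: rest.take (e.toNat + 1)) :: pvGoA (rest.drop (e.toNat + 1))
    else if c = ' ' ∨ c = '\t' ∨ c = '\n' then
      [c] :: pvGoA rest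
    else
      -- inner while-loop: collect the maximal run of token characters
      let tok := (c :: rest).takeWhile pvTokChar
      let tok' :=
        if PySem.Chars.isIn ['-'] tok && !PySem.Chars.startswith tok ['"'] &&
           !PySem.Chars.startswith tok ['-'] && !PySem.Chars.isIn [':'] tok
        then '"' :: tok ++ ['"'] else tok
      tok' :: pvGoA ((c :: rest).dropWhile pvTokChar)
  termination_by l => l.length
  decreasing_by
  all_goals simp only [List.length_cons, List.length_drop]
  · omega
  · omega
  · simp only [List.dropWhile]
    have hc : pvTokChar c = true := by
      simp only [pvTokChar]
      rename_i h1 h2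
      simp only [Bool.not_eq_eq_eq_not, Bool.not_true, Bool.or_eq_false_iff, beq_eq_false_iff_ne,
        ne_eq]
      push Not at h2
      exact ⟨⟨⟨h2.1, h2.2.1⟩, h2.2.2⟩, h1⟩
    rw [hc]
    have := List.length_dropWhile_le (p := pvTokChar) (l := rest)
    simp
    omega

def sanitize_fts_query_py (query : String) : String :=
  if query = "" then query
  else String.ofList (PySem.Chars.join [] (pvGoA query.toList))   -- ''.join(tokens)

-- ===== PORT B =====
def pvQuoteTok (t : List Char) : List Char :=
  if PySem.Chars.isIn ['-'] t && !PySem.Chars.startswith t ['-'] && !PySem.Chars.isIn [':'] t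
  then '"' :: t ++ ['"'] else t

-- ' '.join(_quote_token(t) for t in tabbed.split(' '))
def pvInner (tb : List Char) : List Char :=
  PySem.Chars.join [' '] ((PySem.Chars.splitOn tb [' ']).map pvQuoteTok)

-- '\t'.join(... for tabbed in line.split('\t'))
def pvLine (ln : List Char) : List Char :=
  PySem.Chars.join ['\t'] ((PySem.Chars.splitOn ln ['\t']).map pvInner)

-- '\n'.join(... for line in text.split('\n'))
def pvOutside (s : List Char) : List Char :=
  PySem.Chars.join ['\n'] ((PySem.Chars.splitOn s ['\n']).map pvLine)

-- the while-k loop over parts[1:], two parts at a time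
def pvPairs : List (List Char) → List Char
  | [] => []
  | [p] => '"' :: p
  | p :: q :: rest => ('"' :: p) ++ ('"' :: pvOutside q) ++ pvPairs rest

def sanitize_fts_query_py_alt (query : String) : String :=
  match PySem.Chars.splitOn query.toList ['"'] with
  | [] => ""   -- unreachable: split never returns an empty list
  | p :: rest => String.ofList (pvOutside p ++ pvPairs rest)

-- ===== PRECONDITION & SPEC =====
def Spec_sanitize_fts_query_py (query : String) (out : String) : Prop := out = sanitize_fts_query_py_alt query
instance (query : String) (out : String) : Decidable (Spec_sanitize_fts_query_py query out) := by unfold Spec_sanitize_fts_query_py; infer_instance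

-- ===== CLAIM (what is proved, stated in full; the proofs are below) =====
def Claim_equal_sanitize_fts_query_py : Prop := ∀ (query : String), Dom_sanitize_fts_query_py query → Spec_sanitize_fts_query_py query (sanitize_fts_query_py query)

-- ===== LEMMAS AND PROOFS =====

-- proof-side model of Python's str.split(sep) for a single-character separator
def pvSplit (q : Char) : List Char → List (List Char)
  | [] => [[]]
  | c :: rest =>
    if c = q then [] :: pvSplit q rest
    else
      match pvSplit q rest with
      | [] => [[c]]
      | p :: ps => (c :: p) :: ps

theorem pvSplit_ne_nil (q : Char) (s : List Char) : pvSplit q s ≠ [] := by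
  induction s with
  | nil => simp [pvSplit]
  | cons c rest ih =>
    simp only [pvSplit]
    split_ifs
    · simp
    · cases h : pvSplit q rest <;> simp

def pvConsH (x : List Char) : List (List Char) → List (List Char)
  | [] => [x]
  | p :: ps => (x ++ p) :: ps

theorem pv_go_eq (q : Char) : ∀ (fuel : Nat) (s cur : List Char) (acc : List (List Char)),
    s.length ≤ fuel →
    PySem.Chars.splitOn.go [q] fuel s cur acc = acc.reverse ++ pvConsH cur.reverse (pvSplit q s) := by
  intro fuel
  induction fuel with
  | zero =>
    intro s cur acc h
    have hs : s = [] := by cases s <;> simp_all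
    subst hs
    simp [PySem.Chars.splitOn.go, pvSplit, pvConsH]
  | succ f ih =>
    intro s cur acc h
    cases s with
    | nil => simp [PySem.Chars.splitOn.go, pvSplit, pvConsH]
    | cons c rest =>
      rw [PySem.Chars.splitOn.go]
      by_cases hc : c = q
      · have hpre : List.isPrefixOf [q] (c :: rest) = true := by simp [List.isPrefixOf, hc]
        rw [if_pos hpre]
        simp only [List.length_singleton, List.drop_one, List.tail_cons]
        rw [ih rest [] (cur.reverse :: acc) (by simpa using h)]
        obtain ⟨p, ps, hps⟩ : ∃ p ps, pvSplit q rest = p :: ps := by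
          cases hx : pvSplit q rest with
          | nil => exact absurd hx (pvSplit_ne_nil q rest)
          | cons p ps => exact ⟨p, ps, rfl⟩
        simp [pvSplit, hc, hps, pvConsH]
      · have hpre : List.isPrefixOf [q] (c :: rest) = false := by
          simp [List.isPrefixOf]
          exact fun h' => absurd h'.symm hc
        rw [if_neg (by simp [hpre])]
        rw [ih rest (c :: cur) acc (by simpa using h)]
        obtain ⟨p, ps, hps⟩ : ∃ p ps, pvSplit q rest = p :: ps := by
          cases hx : pvSplit q rest with
          | nil => exact absurd hx (pvSplit_ne_nil q rest)
          | cons p ps => exact ⟨p, ps, rfl⟩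
        simp [pvSplit, hps, pvConsH, hc]

theorem pvSplitOn_eq (q : Char) (s : List Char) :
    PySem.Chars.splitOn s [q] = pvSplit q s := by
  unfold PySem.Chars.splitOn
  rw [pv_go_eq q (s.length + 1) s [] [] (by omega)]
  obtain ⟨p, ps, hps⟩ : ∃ p ps, pvSplit q s = p :: ps := by
    cases hx : pvSplit q s with
    | nil => exact absurd hx (pvSplit_ne_nil q s)
    | cons p ps => exact ⟨p, ps, rfl⟩
  simp [hps, pvConsH]

theorem pvSplit_not_mem {q : Char} {s : List Char} (h : q ∉ s) : pvSplit q s = [s] := by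
  induction s with
  | nil => rfl
  | cons c rest ih =>
    simp only [List.mem_cons, not_or] at h
    simp [pvSplit, Ne.symm h.1, ih h.2]

theorem pvSplit_cons_of_ne {q c : Char} {s : List Char} {p : List Char} {ps : List (List Char)}
    (hc : c ≠ q) (h : pvSplit q s = p :: ps) : pvSplit q (c :: s) = (c :: p) :: ps := by
  simp [pvSplit, hc, h]

theorem pvSplit_append_not_mem {q : Char} {t s : List Char} {p : List Char} {ps : List (List Char)}
    (ht : q ∉ t) (h : pvSplit q s = p :: ps) : pvSplit q (t ++ s) = (t ++ p) :: ps := by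
  induction t with
  | nil => simpa using h
  | cons c tt ih =>
    simp only [List.mem_cons, not_or] at ht
    rw [List.cons_append, pvSplit_cons_of_ne (Ne.symm ht.1) (ih ht.2)]
    rfl

-- proof-side model of sep.join for a single-character separator
def pvJ (q : Char) : List (List Char) → List Char
  | [] => []
  | [p] => p
  | p :: r :: ps => p ++ q :: pvJ q (r :: ps)

theorem pvJoin_eq (q : Char) (ps : List (List Char)) : PySem.Chars.join [q] ps = pvJ q ps := by
  induction ps with
  | nil => exact PySem.Chars.join_nil [q]
  | cons p rest ih =>
    cases rest with
    | nil => exact PySem.Chars.join_singleton [q] p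
    | cons r rs =>
      rw [PySem.Chars.join_cons_cons, ih]
      simp [pvJ]

theorem pvJoin_nil_sep (ps : List (List Char)) : PySem.Chars.join [] ps = ps.flatten := by
  induction ps with
  | nil => exact PySem.Chars.join_nil []
  | cons p rest ih =>
    cases rest with
    | nil => simp [PySem.Chars.join_singleton]
    | cons r rs =>
      rw [PySem.Chars.join_cons_cons, ih]
      simp

theorem pvJ_cons_append (q : Char) (x y : List Char) (ps : List (List Char)) :
    pvJ q ((x ++ y) :: ps) = x ++ pvJ q (y :: ps) := by
  cases ps <;> simp [pvJ]

-- generic split-then-join, proof side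
def pvSJ (f : List Char → List Char) (q : Char) (s : List Char) : List Char :=
  pvJ q ((pvSplit q s).map f)

theorem pvInner_eq (tb : List Char) : pvInner tb = pvSJ pvQuoteTok ' ' tb := by
  simp [pvInner, pvSJ, pvSplitOn_eq, pvJoin_eq]

theorem pvLine_eq (ln : List Char) : pvLine ln = pvSJ pvInner '\t' ln := by
  simp [pvLine, pvSJ, pvSplitOn_eq, pvJoin_eq]

theorem pvOutside_eq (s : List Char) : pvOutside s = pvSJ pvLine '\n' s := by
  simp [pvOutside, pvSJ, pvSplitOn_eq, pvJoin_eq]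

theorem pvSJ_not_mem {f : List Char → List Char} {q : Char} {s : List Char} (h : q ∉ s) :
    pvSJ f q s = f s := by
  simp [pvSJ, pvSplit_not_mem h, pvJ]

theorem pvSJ_cons_sep (f : List Char → List Char) (q : Char) (s : List Char) :
    pvSJ f q (q :: s) = f [] ++ q :: pvSJ f q s := by
  obtain ⟨p, ps, hps⟩ : ∃ p ps, pvSplit q s = p :: ps := by
    cases hx : pvSplit q s with
    | nil => exact absurd hx (pvSplit_ne_nil q s)
    | cons p ps => exact ⟨p, ps, rfl⟩
  simp [pvSJ, pvSplit, hps, pvJ]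

theorem pvSJ_cons_ne {f : List Char → List Char} {q c : Char} (s : List Char) (hc : c ≠ q)
    (hf : ∀ p, f (c :: p) = c :: f p) : pvSJ f q (c :: s) = c :: pvSJ f q s := by
  obtain ⟨p, ps, hps⟩ : ∃ p ps, pvSplit q s = p :: ps := by
    cases hx : pvSplit q s with
    | nil => exact absurd hx (pvSplit_ne_nil q s)
    | cons p ps => exact ⟨p, ps, rfl⟩
  rw [pvSJ, pvSplit_cons_of_ne hc hps, pvSJ, hps]
  simp only [List.map_cons, hf]
  have := pvJ_cons_append q [c] (f p) (ps.map f)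
  simpa using this

theorem pvSJ_append {f : List Char → List Char} {q : Char} {t s g p : List Char}
    {ps : List (List Char)} (ht : q ∉ t) (h : pvSplit q s = p :: ps)
    (hfp : f (t ++ p) = g ++ f p) : pvSJ f q (t ++ s) = g ++ pvSJ f q s := by
  rw [pvSJ, pvSplit_append_not_mem ht h, pvSJ, h]
  simp only [List.map_cons, hfp]
  exact pvJ_cons_append q g (f p) (ps.map f)

-- token characters, in Prop form
def pvTokOK (t : List Char) : Prop := ∀ c ∈ t, pvTokChar c = true

theorem pvTokOK_not_mem {t : List Char} (ht : pvTokOK t) {w : Char}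
    (hw : pvTokChar w = false) : w ∉ t := by
  intro hmem
  rw [ht w hmem] at hw
  cases hw

theorem pvTokChar_ws : pvTokChar ' ' = false ∧ pvTokChar '\t' = false ∧
    pvTokChar '\n' = false ∧ pvTokChar '"' = false := by decide

theorem pvQuoteTok_nil : pvQuoteTok [] = [] := by decide

theorem pvInner_nil : pvInner [] = [] := by decide
theorem pvLine_nil : pvLine [] = [] := by decide
theorem pvOutside_nil : pvOutside [] = [] := by decide

theorem pvInner_cons_space (s : List Char) : pvInner (' ' :: s) = ' ' :: pvInner s := by
  rw [pvInner_eq, pvSJ_cons_sep, pvQuoteTok_nil, pvInner_eq]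
  rfl

theorem pvInner_append {t s : List Char} (ht : pvTokOK t)
    (hs : s = [] ∨ ∃ s', s = ' ' :: s') : pvInner (t ++ s) = pvQuoteTok t ++ pvInner s := by
  have htm : (' ' : Char) ∉ t := pvTokOK_not_mem ht pvTokChar_ws.1
  rcases hs with rfl | ⟨s', rfl⟩
  · rw [List.append_nil, pvInner_eq, pvSJ_not_mem htm, pvInner_nil, List.append_nil]
  · rw [pvInner_eq, pvInner_eq,
      pvSJ_append htm (by simp [pvSplit] : pvSplit ' ' (' ' :: s') = [] :: pvSplit ' ' s')
        (by rw [List.append_nil, pvQuoteTok_nil, List.append_nil] :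
          pvQuoteTok (t ++ []) = pvQuoteTok t ++ pvQuoteTok [])]

theorem pvLine_cons_tab (s : List Char) : pvLine ('\t' :: s) = '\t' :: pvLine s := by
  rw [pvLine_eq, pvSJ_cons_sep, pvInner_nil, pvLine_eq]
  rfl

theorem pvLine_cons_space (s : List Char) : pvLine (' ' :: s) = ' ' :: pvLine s := by
  rw [pvLine_eq, pvSJ_cons_ne s (by decide) pvInner_cons_space, pvLine_eq]

theorem pvLine_append {t s : List Char} (ht : pvTokOK t)
    (hs : s = [] ∨ (∃ s', s = ' ' :: s') ∨ (∃ s', s = '\t' :: s')) :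
    pvLine (t ++ s) = pvQuoteTok t ++ pvLine s := by
  have htm : ('\t' : Char) ∉ t := pvTokOK_not_mem ht pvTokChar_ws.2.1
  have hti : pvInner t = pvQuoteTok t := by
    have := pvInner_append ht (Or.inl rfl)
    rw [List.append_nil, pvInner_nil, List.append_nil] at this
    exact this
  rcases hs with rfl | ⟨s', rfl⟩ | ⟨s', rfl⟩
  · rw [List.append_nil, pvLine_eq, pvSJ_not_mem htm, hti, pvLine_nil, List.append_nil]
  · obtain ⟨p, ps, hps⟩ : ∃ p ps, pvSplit '\t' s' = p :: ps := by
      cases hx : pvSplit '\t' s' with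
      | nil => exact absurd hx (pvSplit_ne_nil _ s')
      | cons p ps => exact ⟨p, ps, rfl⟩
    rw [pvLine_eq, pvLine_eq,
      pvSJ_append htm (pvSplit_cons_of_ne (by decide) hps)
        (pvInner_append ht (Or.inr ⟨p, rfl⟩))]
  · rw [pvLine_eq, pvLine_eq,
      pvSJ_append htm (by simp [pvSplit] : pvSplit '\t' ('\t' :: s') = [] :: pvSplit '\t' s')
        (by rw [List.append_nil, pvInner_nil, List.append_nil, hti] :
          pvInner (t ++ []) = pvQuoteTok t ++ pvInner [])]

theorem pvOutside_cons_ws {w : Char} (hw : w = ' ' ∨ w = '\t' ∨ w = '\n') (s : List Char) :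
    pvOutside (w :: s) = w :: pvOutside s := by
  rcases hw with rfl | rfl | rfl
  · rw [pvOutside_eq, pvSJ_cons_ne s (by decide) pvLine_cons_space, pvOutside_eq]
  · rw [pvOutside_eq, pvSJ_cons_ne s (by decide) pvLine_cons_tab, pvOutside_eq]
  · rw [pvOutside_eq, pvSJ_cons_sep, pvLine_nil, pvOutside_eq]
    rfl

theorem pvOutside_append {t s : List Char} (ht : pvTokOK t)
    (hs : s = [] ∨ ∃ w s', s = w :: s' ∧ (w = ' ' ∨ w = '\t' ∨ w = '\n')) :
    pvOutside (t ++ s) = pvQuoteTok t ++ pvOutside s := by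
  have htm : ('\n' : Char) ∉ t := pvTokOK_not_mem ht pvTokChar_ws.2.2.1
  have htl : pvLine t = pvQuoteTok t := by
    have := pvLine_append ht (Or.inl rfl)
    rw [List.append_nil, pvLine_nil, List.append_nil] at this
    exact this
  rcases hs with rfl | ⟨w, s', rfl, hw⟩
  · rw [List.append_nil, pvOutside_eq, pvSJ_not_mem htm, htl, pvOutside_nil, List.append_nil]
  · rcases hw with rfl | rfl | rfl
    · obtain ⟨p, ps, hps⟩ : ∃ p ps, pvSplit '\n' s' = p :: ps := by
        cases hx : pvSplit '\n' s' with
        | nil => exact absurd hx (pvSplit_ne_nil _ s')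
        | cons p ps => exact ⟨p, ps, rfl⟩
      rw [pvOutside_eq, pvOutside_eq,
        pvSJ_append htm (pvSplit_cons_of_ne (by decide) hps)
          (pvLine_append ht (Or.inr (Or.inl ⟨p, rfl⟩)))]
    · obtain ⟨p, ps, hps⟩ : ∃ p ps, pvSplit '\n' s' = p :: ps := by
        cases hx : pvSplit '\n' s' with
        | nil => exact absurd hx (pvSplit_ne_nil _ s')
        | cons p ps => exact ⟨p, ps, rfl⟩
      rw [pvOutside_eq, pvOutside_eq,
        pvSJ_append htm (pvSplit_cons_of_ne (by decide) hps)
          (pvLine_append ht (Or.inr (Or.inr ⟨p, rfl⟩)))]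
    · rw [pvOutside_eq, pvOutside_eq,
        pvSJ_append htm (by simp [pvSplit] : pvSplit '\n' ('\n' :: s') = [] :: pvSplit '\n' s')
          (by rw [List.append_nil, pvLine_nil, List.append_nil, htl] :
            pvLine (t ++ []) = pvQuoteTok t ++ pvLine [])]

-- B's value, in terms of the proof-side split
def pvB (l : List Char) : List Char :=
  match pvSplit '"' l with
  | [] => []
  | p :: ps => pvOutside p ++ pvPairs ps

theorem pvB_alt (query : String) : sanitize_fts_query_py_alt query = String.ofList (pvB query.toList) := by
  rw [sanitize_fts_query_py_alt]
  rw [pvSplitOn_eq]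
  obtain ⟨p, ps, hps⟩ : ∃ p ps, pvSplit '"' query.toList = p :: ps := by
    cases hx : pvSplit '"' query.toList with
    | nil => exact absurd hx (pvSplit_ne_nil _ _)
    | cons p ps => exact ⟨p, ps, rfl⟩
  rw [hps, pvB, hps]

-- mem of a single char as an infix, both ways
theorem pv_mem_iff_infix {a : Char} {l : List Char} : a ∈ l ↔ [a] <:+: l := by
  constructor
  · intro h
    obtain ⟨s, t, rfl⟩ := List.mem_iff_append.mp h
    exact ⟨s, t, by simp⟩
  · rintro ⟨s, t, rfl⟩
    simp

-- single-character find: decomposition of the string at the first occurrence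
theorem pv_find_char_decomp {rest : List Char} {q : Char}
    (h : PySem.Chars.find rest [q] ≠ -1) :
    let n := (PySem.Chars.find rest [q]).toNat
    q ∉ rest.take n ∧ rest.take (n + 1) = rest.take n ++ [q] ∧
      rest = rest.take n ++ q :: rest.drop (n + 1) := by
  intro n
  have h0 : 0 ≤ PySem.Chars.find rest [q] := by
    have := PySem.Chars.neg_one_le_find (s := rest) (sub := [q])
    omega
  obtain ⟨hpre, hmin⟩ := PySem.Chars.find_spec h0
  obtain ⟨u, hu⟩ := hpre
  have hdt : rest.drop n = q :: u := by
    rw [← hu]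
    rfl
  have hgetn : rest[n]? = some q := by
    have h0' : (rest.drop n)[0]? = some q := by rw [hdt]; rfl
    rw [List.getElem?_drop] at h0'
    simpa using h0'
  have hlen : n < rest.length := List.getElem?_eq_some_iff.mp hgetn |>.1
  have hg : rest[n] = q := by
    rw [List.getElem?_eq_getElem hlen] at hgetn
    exact Option.some.inj hgetn
  have hnotmem : q ∉ rest.take n := by
    intro hmem
    obtain ⟨i, hi, hgi⟩ := List.mem_take_iff_getElem.mp hmem
    have hi' : i < n := by omega
    have hiL : i < rest.length := by omega
    apply hmin i hi'
    refine ⟨rest.drop (i + 1), ?_⟩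
    rw [List.drop_eq_getElem_cons hiL, hgi]
    rfl
  refine ⟨hnotmem, ?_, ?_⟩
  · rw [List.take_add_one, hgetn]
    rfl
  · conv_lhs => rw [← List.take_append_drop n rest]
    congr 1
    rw [List.drop_eq_getElem_cons hlen, hg]

-- first element of dropWhile fails the predicate
theorem pv_dropWhile_head_false {p : Char → Bool} : ∀ {l d : List Char} {c : Char},
    l.dropWhile p = c :: d → p c = false := by
  intro l
  induction l with
  | nil => intro d c h; simp [List.dropWhile] at h
  | cons x xs ih =>
    intro d c h
    rw [List.dropWhile_cons] at h
    by_cases hx : p x = true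
    · rw [if_pos hx] at h
      exact ih h
    · rw [if_neg hx] at h
      injection h with h1 _
      cases hpx : p x with
      | true => exact absurd hpx hx
      | false => rw [← h1]; exact hpx

theorem pv_main : ∀ (n : Nat) (l : List Char), l.length ≤ n →
    (pvGoA l).flatten = pvB l := by
  intro n
  induction n with
  | zero =>
    intro l h
    have : l = [] := by cases l <;> simp_all
    subst this
    simp [pvGoA, pvB, pvSplit, pvOutside_nil, pvPairs]
  | succ m ih =>
    intro l hlen
    cases l with
    | nil => simp [pvGoA, pvB, pvSplit, pvOutside_nil, pvPairs]
    | cons c rest =>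
      rw [pvGoA]
      by_cases hq : c = '"'
      · subst hq
        simp only [if_true]
        by_cases he : PySem.Chars.find rest ['"'] = -1
        · rw [if_pos he]
          have hnm : '"' ∉ rest := by
            rw [pv_mem_iff_infix]
            exact (PySem.Chars.find_eq_neg_one_iff rest ['"']).mp he
          simp only [pvB]
          rw [show pvSplit '"' ('"' :: rest) = [] :: pvSplit '"' rest by simp [pvSplit]]
          rw [pvSplit_not_mem hnm]
          simp [pvPairs, pvOutside_nil]
        · rw [if_neg he]
          obtain ⟨hnm, htk, hdec⟩ := pv_find_char_decomp he
          set n₀ := (PySem.Chars.find rest ['"']).toNat with hn₀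
          have hlt : (rest.drop (n₀ + 1)).length ≤ m := by
            have hrest : rest ≠ [] := by
              intro hr
              rw [hr] at hdec
              simp at hdec
            have : 0 < rest.length := List.length_pos_of_ne_nil hrest
            simp at hlen
            simp
            omega
          rw [List.flatten_cons, ih _ hlt]
          obtain ⟨p, ps, hps⟩ : ∃ p ps, pvSplit '"' (rest.drop (n₀ + 1)) = p :: ps := by
            cases hx : pvSplit '"' (rest.drop (n₀ + 1)) with
            | nil => exact absurd hx (pvSplit_ne_nil _ _)
            | cons p ps => exact ⟨p, ps, rfl⟩
          have hsplit : pvSplit '"' ('"' :: rest) =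
              [] :: rest.take n₀ :: p :: ps := by
            conv_lhs => rw [show ('"' :: rest) = '"' :: (rest.take n₀ ++ '"' :: rest.drop (n₀ + 1)) by
              rw [← hdec]]
            rw [show pvSplit '"' ('"' :: (rest.take n₀ ++ '"' :: rest.drop (n₀ + 1))) =
                [] :: pvSplit '"' (rest.take n₀ ++ '"' :: rest.drop (n₀ + 1)) by simp [pvSplit]]
            rw [pvSplit_append_not_mem hnm
              (show pvSplit '"' ('"' :: rest.drop (n₀ + 1)) = [] :: (p :: ps) by
                simp [pvSplit, hps])]
            simp
          simp only [pvB]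
          rw [hsplit, hps]
          simp [pvPairs, pvOutside_nil, htk]
      · rw [if_neg hq]
        by_cases hws : c = ' ' ∨ c = '\t' ∨ c = '\n'
        · rw [if_pos hws]
          obtain ⟨p, ps, hps⟩ : ∃ p ps, pvSplit '"' rest = p :: ps := by
            cases hx : pvSplit '"' rest with
            | nil => exact absurd hx (pvSplit_ne_nil _ _)
            | cons p ps => exact ⟨p, ps, rfl⟩
          rw [List.flatten_cons, ih rest (by simp at hlen; omega)]
          simp only [pvB]
          rw [pvSplit_cons_of_ne hq hps, hps]
          simp [pvOutside_cons_ws hws]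
        · rw [if_neg hws]
          simp only []
          have hc : pvTokChar c = true := by
            simp only [pvTokChar, Bool.not_eq_eq_eq_not, Bool.not_true, Bool.or_eq_false_iff,
              beq_eq_false_iff_ne, ne_eq]
            push Not at hws
            exact ⟨⟨⟨hws.1, hws.2.1⟩, hws.2.2⟩, hq⟩
          set tok := (c :: rest).takeWhile pvTokChar with htok
          set rem := (c :: rest).dropWhile pvTokChar with hrem
          have htokc : tok = c :: rest.takeWhile pvTokChar := by
            rw [htok, List.takeWhile_cons, if_pos hc]
          have hremc : rem = rest.dropWhile pvTokChar := by
            rw [hrem, List.dropWhile_cons, if_pos hc]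
          have hdecomp : (c :: rest) = tok ++ rem := (List.takeWhile_append_dropWhile).symm
          have htOK : pvTokOK tok := fun x hx => List.mem_takeWhile_imp hx
          have hremlen : rem.length ≤ m := by
            have := List.length_dropWhile_le (p := pvTokChar) (l := rest)
            rw [hremc]
            simp at hlen
            omega
          have hstart : PySem.Chars.startswith tok ['"'] = false := by
            rw [htokc]
            simp [PySem.Chars.startswith, List.isPrefixOf]
            exact fun h' => absurd h'.symm hq
          have htok' :
              (if PySem.Chars.isIn ['-'] tok && !PySem.Chars.startswith tok ['"'] &&
                  !PySem.Chars.startswith tok ['-'] && !PySem.Chars.isIn [':'] tok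
               then '"' :: tok ++ ['"'] else tok) = pvQuoteTok tok := by
            rw [pvQuoteTok, hstart]
            simp
          rw [htok', List.flatten_cons, ih rem hremlen]
          have hq_tok : ('"' : Char) ∉ tok := pvTokOK_not_mem htOK pvTokChar_ws.2.2.2
          have hOT : pvOutside tok = pvQuoteTok tok := by
            have := pvOutside_append htOK (Or.inl rfl)
            rw [List.append_nil, pvOutside_nil, List.append_nil] at this
            exact this
          have hwsCase : ∀ (d : Char) (r : List Char), d = ' ' ∨ d = '\t' ∨ d = '\n' →
              pvQuoteTok tok ++ pvB (d :: r) = pvB (tok ++ d :: r) := by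
            intro d r hw
            obtain ⟨p, ps, hps⟩ : ∃ p ps, pvSplit '"' r = p :: ps := by
              cases hx : pvSplit '"' r with
              | nil => exact absurd hx (pvSplit_ne_nil _ _)
              | cons p ps => exact ⟨p, ps, rfl⟩
            have hdq : d ≠ '"' := by rcases hw with rfl | rfl | rfl <;> decide
            simp only [pvB]
            rw [pvSplit_append_not_mem hq_tok (pvSplit_cons_of_ne hdq hps),
              pvSplit_cons_of_ne hdq hps]
            simp [pvOutside_append htOK (Or.inr ⟨d, p, rfl, hw⟩)]
          cases hrm : rem with
          | nil =>
            rw [hrm] at hdecomp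
            rw [List.append_nil] at hdecomp
            rw [hdecomp]
            simp only [pvB]
            rw [pvSplit_not_mem hq_tok]
            simp [pvSplit, pvPairs, pvOutside_nil, hOT]
          | cons d r =>
            have hd : pvTokChar d = false := pv_dropWhile_head_false (hremc ▸ hrm)
            have hd4 : d = ' ' ∨ d = '\t' ∨ d = '\n' ∨ d = '"' := by
              simp only [pvTokChar, Bool.not_eq_false', Bool.or_eq_true, beq_iff_eq] at hd
              tauto
            rw [hdecomp, hrm]
            by_cases hdq : d = '"'
            · subst hdq
              obtain ⟨p, ps, hps⟩ : ∃ p ps, pvSplit '"' r = p :: ps := by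
                cases hx : pvSplit '"' r with
                | nil => exact absurd hx (pvSplit_ne_nil _ _)
                | cons p ps => exact ⟨p, ps, rfl⟩
              simp only [pvB]
              rw [pvSplit_append_not_mem hq_tok
                (show pvSplit '"' ('"' :: r) = [] :: (p :: ps) by simp [pvSplit, hps]),
                show pvSplit '"' ('"' :: r) = [] :: (p :: ps) by simp [pvSplit, hps]]
              simp [pvOutside_nil, hOT]
            · exact hwsCase d r (by tauto)

-- ===== VERDICT (by name: the statement is the Claim_ definition above) =====
theorem sanitize_fts_query_py_spec : Claim_equal_sanitize_fts_query_py := by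
  intro query _
  unfold Spec_sanitize_fts_query_py
  rw [sanitize_fts_query_py]
  by_cases hq : query = ""
  · subst hq
    decide
  · rw [if_neg hq, pvJoin_nil_sep, pv_main query.toList.length query.toList le_rfl, pvB_alt]
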